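-- pv_equiv track=rewrite | github.com/PuiuTroiu/fundamentele-programarii | Seminar12/main.py | CifEgaleRec
-- ===== SOURCE A (Python) =====
-- def CifEgaleRec(n,k):
--     if n < 10:
--         if n != k:
--             return False
--         return True
--     if n % 10 == k:
--         return CifEgaleRec(n//10,k)
--     return False
-- ===== SOURCE B (Python) =====
-- def CifEgaleRec(n, k):
--     while n >= 10:
--         n, d = divmod(n, 10)
--         if d != k:
--             return False
--     return n == k
-- ===== Notes on version B (the rewrite author's own statement) =====
-- stated objective: idiomatic
-- what changed: Replaced the recursive digit check with an iterative while loop that strips the low digit with divmod and checks it, finishing with a single n == k compare that covers negatives and single-digit n.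
import Mathlib
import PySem

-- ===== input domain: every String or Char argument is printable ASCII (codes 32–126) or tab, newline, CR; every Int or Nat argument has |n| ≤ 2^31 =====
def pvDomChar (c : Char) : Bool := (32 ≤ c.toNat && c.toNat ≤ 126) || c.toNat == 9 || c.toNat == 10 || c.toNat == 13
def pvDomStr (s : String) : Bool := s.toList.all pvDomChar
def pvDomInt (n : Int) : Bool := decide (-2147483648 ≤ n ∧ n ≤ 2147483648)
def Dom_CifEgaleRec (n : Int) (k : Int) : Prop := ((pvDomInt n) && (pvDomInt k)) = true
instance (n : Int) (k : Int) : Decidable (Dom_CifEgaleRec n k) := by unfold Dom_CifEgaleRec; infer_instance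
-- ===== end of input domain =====

-- Header: B replaces A's recursion by an iterative divmod loop (same return value; no speed claim).


-- termination helper used by both ports
theorem pvFloordivTen_lt (n : Int) (h : 10 ≤ n) :
    (PySem.Int.floordiv n 10).toNat < n.toNat := by
  rw [PySem.Int.floordiv_eq_ediv_of_pos (by norm_num)]
  omega

-- ===== PORT A =====
def CifEgaleRec (n : Int) (k : Int) : Bool :=
  if n < 10 then
    if n ≠ k then false
    else true
  else if PySem.Int.mod n 10 == k then CifEgaleRec (PySem.Int.floordiv n 10) k
  else false
termination_by n.toNat
decreasing_by exact pvFloordivTen_lt n (by omega)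

-- ===== PORT B =====
-- the while loop of Source B: strip and test the low digit while n >= 10, then compare
def CifEgaleRec_alt (n : Int) (k : Int) : Bool :=
  if h : 10 ≤ n then
    match hd : PySem.Int.divmod? n 10 with
    | some (n', d) => if d ≠ k then false else CifEgaleRec_alt n' k
    | none => false
  else n == k
termination_by n.toNat
decreasing_by
  have : n' = PySem.Int.floordiv n 10 := by
    simp [PySem.Int.divmod?] at hd
    exact hd.1.symm
  rw [this]; exact pvFloordivTen_lt n h

-- ===== PRECONDITION & SPEC =====
def Spec_CifEgaleRec (n : Int) (k : Int) (out : Bool) : Prop := out = CifEgaleRec_alt n k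
instance (n : Int) (k : Int) (out : Bool) : Decidable (Spec_CifEgaleRec n k out) := by unfold Spec_CifEgaleRec; infer_instance

-- ===== CLAIM (what is proved, stated in full; the proofs are below) =====
def Claim_equal_CifEgaleRec : Prop := ∀ (n : Int) (k : Int), Dom_CifEgaleRec n k → Spec_CifEgaleRec n k (CifEgaleRec n k)

-- ===== LEMMAS AND PROOFS =====
theorem CifEgaleRec_eq_alt (n k : Int) : CifEgaleRec n k = CifEgaleRec_alt n k := by
  rw [CifEgaleRec, CifEgaleRec_alt]
  by_cases h : n < 10
  · rw [if_pos h, dif_neg (by omega)]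
    by_cases hk : n = k <;> simp [hk]
  · rw [if_neg h, dif_pos (by omega)]
    have hIH := CifEgaleRec_eq_alt (PySem.Int.floordiv n 10) k
    simp only [PySem.Int.mod, PySem.Int.floordiv] at hIH ⊢
    simp [PySem.Int.divmod?, Int.fmod_eq_emod,
      Int.fdiv_eq_ediv_of_nonneg n (by norm_num : (0 : Int) ≤ 10)] at hIH ⊢
    rw [hIH]
termination_by n.toNat
decreasing_by exact pvFloordivTen_lt n (by omega)

-- ===== VERDICT (by name: the statement is the Claim_ definition above) =====
theorem CifEgaleRec_spec : Claim_equal_CifEgaleRec := by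
  intro n k _
  unfold Spec_CifEgaleRec
  exact CifEgaleRec_eq_alt n k
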